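-- pv_equiv track=rewrite | github.com/vinayakas1997/new_opcua_fins_async | OMRON_FINS_PROTOCOL/Infrastructure/udp_connection.py | _calculate_read_chunks
-- ===== SOURCE A (Python) =====
-- from typing import Optional, Tuple, Union, Dict, List, Any, Callable
--
-- MAX_CHUNK_SIZE = 990  # Maximum words per FINS command chunk
--
-- def _calculate_read_chunks(total_words: int) -> List[Tuple[int, int]]:
--     """
--     Calculate read chunks for large data transfers.
--
--     Args:
--         total_words: Total number of words to read
--
--     Returns:
--         List of (offset, chunk_size) tuples
--     """
--     chunks = []
--     remaining = total_words
--     offset = 0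
--
--     while remaining > 0:
--         chunk_size = min(remaining, MAX_CHUNK_SIZE)
--         chunks.append((offset, chunk_size))
--         offset += chunk_size
--         remaining -= chunk_size
--
--     return chunks
-- ===== SOURCE B (Python) =====
-- MAX_CHUNK_SIZE = 990  # Maximum words per FINS command chunk
--
-- def _calculate_read_chunks(total_words):
--     if total_words <= 0:
--         return []
--     full, rem = divmod(total_words, MAX_CHUNK_SIZE)
--     chunks = [(i * MAX_CHUNK_SIZE, MAX_CHUNK_SIZE) for i in range(full)]
--     if rem:
--         chunks.append((full * MAX_CHUNK_SIZE, rem))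
--     return chunks
-- ===== Notes on version B (the rewrite author's own statement) =====
-- stated objective: alternative
-- what changed: Computes the number of full chunks and the tail size up front with one divmod instead of A's while loop that repeatedly takes min(remaining, MAX_CHUNK_SIZE) and threads remaining/offset accumulators; each full chunk's offset is found by arithmetic and the partial tail chunk is appended once at the end.
import Mathlib
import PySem

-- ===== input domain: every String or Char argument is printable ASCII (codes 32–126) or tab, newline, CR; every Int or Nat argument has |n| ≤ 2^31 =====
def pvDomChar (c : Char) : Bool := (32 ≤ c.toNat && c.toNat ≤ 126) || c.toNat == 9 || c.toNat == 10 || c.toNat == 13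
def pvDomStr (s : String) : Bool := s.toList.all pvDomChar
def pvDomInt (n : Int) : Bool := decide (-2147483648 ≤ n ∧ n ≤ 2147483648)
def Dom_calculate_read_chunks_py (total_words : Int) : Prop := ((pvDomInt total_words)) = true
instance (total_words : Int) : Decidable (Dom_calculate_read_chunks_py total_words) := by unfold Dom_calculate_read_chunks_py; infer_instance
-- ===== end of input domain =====

-- B replaces A's while loop (min(remaining,990) per step, threading remaining/offset) with one
-- divmod computing the full-chunk count and tail size up front; objective: alternative.

-- ===== PORT A =====
-- the while loop of A: state (chunks, remaining, offset), appending one chunk per iteration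
def calculate_read_chunks_loop (chunks : List (Int × Int)) (remaining offset : Int) :
    List (Int × Int) :=
  if remaining > 0 then
    let chunk_size := min remaining 990
    calculate_read_chunks_loop (chunks ++ [(offset, chunk_size)])
      (remaining - chunk_size) (offset + chunk_size)
  else chunks
termination_by remaining.toNat
decreasing_by omega

def calculate_read_chunks_py (total_words : Int) : List (Int × Int) :=
  calculate_read_chunks_loop [] total_words 0

-- ===== PORT B =====
def calculate_read_chunks_py_alt (total_words : Int) : List (Int × Int) :=
  if total_words ≤ 0 then []
  else
    let full := PySem.Int.floordiv total_words 990
    let rem := PySem.Int.mod total_words 990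
    let chunks := (PySem.List.pyRange 0 full 1).map (fun i => (i * 990, (990 : Int)))
    if rem ≠ 0 then chunks ++ [(full * 990, rem)] else chunks

-- ===== PRECONDITION & SPEC =====
def Spec_calculate_read_chunks_py (total_words : Int) (out : List (Int × Int)) : Prop := out = calculate_read_chunks_py_alt total_words
instance (total_words : Int) (out : List (Int × Int)) : Decidable (Spec_calculate_read_chunks_py total_words out) := by unfold Spec_calculate_read_chunks_py; infer_instance

-- ===== CLAIM (what is proved, stated in full; the proofs are below) =====
def Claim_equal_calculate_read_chunks_py : Prop := ∀ (total_words : Int), Dom_calculate_read_chunks_py total_words → Spec_calculate_read_chunks_py total_words (calculate_read_chunks_py total_words)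

-- ===== LEMMAS AND PROOFS =====

-- loop invariant: with remaining = q*990 + r (0 ≤ r < 990), the loop appends q full chunks
-- at offsets off + i*990 and then, if r ≠ 0, one tail chunk (off + q*990, r)
theorem loop_divmod (q : Nat) (r off : Int) (chunks : List (Int × Int))
    (hr0 : 0 ≤ r) (hr : r < 990) :
    calculate_read_chunks_loop chunks ((q : Int) * 990 + r) off
      = chunks ++ (List.range q).map (fun (i : Nat) => (off + (i : Int) * 990, (990 : Int)))
          ++ (if r ≠ 0 then [(off + (q : Int) * 990, r)] else []) := by
  induction q generalizing off chunks with
  | zero =>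
    rw [calculate_read_chunks_loop]
    by_cases h : r = 0
    · simp [h]
    · have hpos : (0 : Int) * 990 + r > 0 := by omega
      simp only [Nat.cast_zero, if_pos hpos]
      have hmin : min ((0 : Int) * 990 + r) 990 = r := by omega
      rw [hmin]
      rw [calculate_read_chunks_loop]
      simp [h, show ¬ ((0:Int) * 990 + r - r > 0) by omega]
  | succ n ih =>
    rw [calculate_read_chunks_loop]
    have hpos : ((n : Int) + 1) * 990 + r > 0 := by positivity
    simp only [Nat.cast_succ, if_pos (show ((n:Int)+1) * 990 + r > 0 by omega)]
    have hmin : min (((n : Int) + 1) * 990 + r) 990 = 990 := by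
      have : (0:Int) ≤ (n : Int) * 990 := by positivity
      omega
    rw [hmin, show ((n:Int)+1) * 990 + r - 990 = (n : Int) * 990 + r by ring]
    rw [ih (off + 990) (chunks ++ [(off, 990)])]
    rw [List.range_succ_eq_map, List.map_cons, List.map_map]
    have hmap2 : (List.range n).map
          ((fun (i : Nat) => (off + (i : Int) * 990, (990 : Int))) ∘ Nat.succ)
        = (List.range n).map (fun (i : Nat) => (off + 990 + (i : Int) * 990, (990 : Int))) := by
      apply List.map_congr_left
      intro k _
      simp only [Function.comp_apply]
      congr 1
      push_cast
      ring
    rw [hmap2]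
    by_cases h : r = 0
    · simp [h]
    · simp only [h, ne_eq, not_false_eq_true, if_pos, List.append_assoc, List.cons_append,
        List.singleton_append, Nat.cast_zero, zero_mul, add_zero]
      ring_nf
      simp

-- ===== VERDICT (by name: the statement is the Claim_ definition above) =====
theorem calculate_read_chunks_py_spec : Claim_equal_calculate_read_chunks_py := by
  intro t _
  unfold Spec_calculate_read_chunks_py calculate_read_chunks_py calculate_read_chunks_py_alt
  by_cases hle : t ≤ 0
  · rw [if_pos hle, calculate_read_chunks_loop]
    simp [show ¬ (t > 0) by omega]
  · rw [if_neg hle]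
    have hfd : PySem.Int.floordiv t 990 = t / 990 :=
      PySem.Int.floordiv_eq_ediv_of_pos (by omega)
    have hmd : PySem.Int.mod t 990 = t % 990 :=
      PySem.Int.mod_eq_emod_of_pos (by omega)
    have hq0 : 0 ≤ t / 990 := Int.ediv_nonneg (by omega) (by omega)
    have hr0 : 0 ≤ t % 990 := Int.emod_nonneg t (by omega)
    have hrlt : t % 990 < 990 := Int.emod_lt_of_pos t (by omega)
    have ht : ((t / 990).toNat : Int) * 990 + t % 990 = t := by
      rw [Int.toNat_of_nonneg hq0]
      have := Int.ediv_add_emod t 990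
      omega
    have key := loop_divmod (t / 990).toNat (t % 990) 0 [] hr0 hrlt
    rw [ht] at key
    rw [key]
    simp only [hfd, hmd, List.nil_append]
    rw [PySem.List.pyRange_one, List.map_map]
    have hlen : ((t / 990 : Int) - 0).toNat = (t / 990).toNat := by norm_num
    rw [hlen]
    have hmap : (List.range (t / 990).toNat).map
          ((fun i => (i * 990, (990 : Int))) ∘ (fun k : Nat => (0 : Int) + (k : Int)))
        = (List.range (t / 990).toNat).map
          (fun (i : Nat) => ((0 : Int) + (i : Int) * 990, (990 : Int))) := by
      apply List.map_congr_left
      intro k _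
      simp only [Function.comp_apply]
      norm_num
    rw [hmap]
    by_cases h : t % 990 = 0
    · simp [h]
    · simp only [h, ne_eq, not_false_eq_true, if_pos]
      congr 2
      rw [Int.toNat_of_nonneg hq0]
      norm_num
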